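-- pv_equiv track=rewrite | github.com/wkumagai/cost-aware-research-search | logs/runs/20260311_194414/iter_02_repair.py | calculate_clause_count
-- ===== SOURCE A (Python) =====
-- def calculate_clause_count(sentence):
--     """Count clauses based on conjunctions and relative pronouns"""
--     clause_indicators = ['that', 'which', 'who', 'where', 'when', 'and', 'but', 'or', 'because', 'since', 'while']
--     count = 1  # Start with main clause
--
--     words = sentence.lower().split()
--     for word in words:
--         if word.rstrip('.,!?') in clause_indicators:
--             count += 1
--
--     return count
-- ===== SOURCE B (Python) =====
-- def calculate_clause_count(sentence):
--     """Count clauses based on conjunctions and relative pronouns"""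
--     clause_indicators = ['that', 'which', 'who', 'where', 'when', 'and', 'but', 'or', 'because', 'since', 'while']
--     # Build a frequency table of the normalised words once, then sum over the
--     # fixed indicator list instead of testing membership word by word.
--     table = {}
--     for word in sentence.lower().split():
--         w = word.rstrip('.,!?')
--         table[w] = table.get(w, 0) + 1
--     return 1 + sum(table.get(ind, 0) for ind in clause_indicators)
-- ===== Notes on version B (the rewrite author's own statement) =====
-- stated objective: alternative
-- what changed: B builds a frequency table of the punctuation-stripped lowercased words in one pass and then sums the table entries of the 11 fixed indicators, instead of testing each word's membership in the indicator list.
import Mathlib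
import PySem

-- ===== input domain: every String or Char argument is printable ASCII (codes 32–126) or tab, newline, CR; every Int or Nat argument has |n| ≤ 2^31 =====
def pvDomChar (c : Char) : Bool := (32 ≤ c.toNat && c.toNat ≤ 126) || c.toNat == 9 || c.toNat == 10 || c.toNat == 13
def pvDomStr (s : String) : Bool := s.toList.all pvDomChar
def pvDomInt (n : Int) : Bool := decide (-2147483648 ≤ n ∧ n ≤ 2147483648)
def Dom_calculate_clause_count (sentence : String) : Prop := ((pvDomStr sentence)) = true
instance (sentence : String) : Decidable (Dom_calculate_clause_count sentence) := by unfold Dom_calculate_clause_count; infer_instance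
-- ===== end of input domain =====

-- B replaces the per-word membership test by a word-frequency table summed over the fixed indicator list (alternative decomposition, same cost).


-- shared literal constant of both Pythons
def pvIndicators : List String := ["that", "which", "who", "where", "when", "and", "but", "or", "because", "since", "while"]

-- hand port of w.rstrip('.,!?'): drop the longest trailing run of these four chars (exact: rstrip removes exactly that run)
def pvRstripPunct (w : String) : String :=
  String.ofList ((w.toList.reverse.dropWhile (fun c => c == '.' || c == ',' || c == '!' || c == '?')).reverse)

-- ===== PORT A =====
def calculate_clause_count (sentence : String) : Int :=
  let words := PySem.Str.split₀ (PySem.Str.lower sentence)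
  words.foldl (fun count word => if pvRstripPunct word ∈ pvIndicators then count + 1 else count) 1

-- ===== PORT B =====
def calculate_clause_count_alt (sentence : String) : Int :=
  let table : PySem.Dict String Int :=
    (PySem.Str.split₀ (PySem.Str.lower sentence)).foldl
      (fun d word => let w := pvRstripPunct word; d.insert w (d.getD w 0 + 1)) PySem.Dict.empty
  1 + (pvIndicators.map (fun ind => table.getD ind 0)).sum

-- ===== PRECONDITION & SPEC =====
def Spec_calculate_clause_count (sentence : String) (out : Int) : Prop := out = calculate_clause_count_alt sentence
instance (sentence : String) (out : Int) : Decidable (Spec_calculate_clause_count sentence out) := by unfold Spec_calculate_clause_count; infer_instance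

-- ===== CLAIM (what is proved, stated in full; the proofs are below) =====
def Claim_equal_calculate_clause_count : Prop := ∀ (sentence : String), Dom_calculate_clause_count sentence → Spec_calculate_clause_count sentence (calculate_clause_count sentence)

-- ===== LEMMAS AND PROOFS =====

-- summing per-indicator counts over a duplicate-free list equals counting words whose image lies in the list
theorem pv_sum_count_eq_countP (inds : List String) (hn : inds.Nodup) (l : List String) :
    (inds.map (fun v => (l.count v : Int))).sum = (l.countP (fun w => decide (w ∈ inds)) : Int) := by
  induction l with
  | nil => simp
  | cons x l ih =>
    have hstep : (inds.map (fun v => (((x :: l).count v : Int)))).sum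
        = (inds.map (fun v => ((l.count v : Int) + (if (x == v) then 1 else 0)))).sum := by
      congr 1
      apply List.map_congr_left
      intro v _
      rw [List.count_cons]
      push_cast
      split <;> simp
    rw [hstep, PySem.List.sum_map_add_int, ih]
    have hcount : (inds.map (fun v => (if (x == v) then (1:Int) else 0))).sum
        = if x ∈ inds then 1 else 0 := by
      rw [PySem.List.sum_map_ite_one_zero]
      have : List.countP (fun v => x == v) inds = inds.count x := by
        unfold List.count
        apply List.countP_congr
        intro v _
        by_cases h : x = v
        · subst h; rfl
        · simp [h, Ne.symm h]
      rw [this]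
      by_cases hx : x ∈ inds
      · rw [List.count_eq_one_of_mem hn hx]; simp [hx]
      · rw [List.count_eq_zero_of_not_mem hx]; simp [hx]
    rw [hcount, List.countP_cons]
    by_cases hx : x ∈ inds <;> simp [hx]

theorem calculate_clause_count_eq (s : String) :
    calculate_clause_count s = calculate_clause_count_alt s := by
  unfold calculate_clause_count calculate_clause_count_alt
  dsimp only
  rw [PySem.List.foldl_ite_add_one]
  have htab : ∀ (l : List String) (d : PySem.Dict String Int) (v : String),
      (l.foldl (fun d word => let w := pvRstripPunct word; d.insert w (d.getD w 0 + 1)) d).getD v 0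
      = d.getD v 0 + ((l.map pvRstripPunct).count v : Int) := by
    intro l
    induction l with
    | nil => intro d v; simp
    | cons x l ih =>
      intro d v
      simp only [List.foldl_cons, List.map_cons, List.count_cons, ih]
      rw [PySem.Dict.getD_insert]
      by_cases h : v = pvRstripPunct x
      · simp [h]; ring
      · have hne : ¬ (pvRstripPunct x == v) = true := by
          simp only [beq_iff_eq]
          exact fun hh => h hh.symm
        simp [h, hne]
  have hmap : pvIndicators.map (fun ind =>
        ((PySem.Str.split₀ (PySem.Str.lower s)).foldl
          (fun d word => let w := pvRstripPunct word; d.insert w (d.getD w 0 + 1))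
          PySem.Dict.empty).getD ind 0)
      = pvIndicators.map (fun ind =>
          ((((PySem.Str.split₀ (PySem.Str.lower s)).map pvRstripPunct).count ind : Int))) := by
    apply List.map_congr_left
    intro v _
    rw [htab]
    simp [PySem.Dict.getD, PySem.Dict.get?, PySem.Dict.empty]
  rw [hmap, pv_sum_count_eq_countP pvIndicators (by decide), List.countP_map]
  rfl

-- ===== VERDICT (by name: the statement is the Claim_ definition above) =====
theorem calculate_clause_count_spec : Claim_equal_calculate_clause_count := by
  intro s _
  exact calculate_clause_count_eq s
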